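-- pv_equiv track=rewrite | github.com/dallasheidt14/PitchRank | scripts/team_name_normalizer.py | extract_squad_identifier
-- ===== SOURCE A (Python) =====
-- COLORS = {'black', 'blue', 'red', 'white', 'navy', 'gold', 'orange', 'green',
--           'silver', 'gray', 'grey', 'purple', 'yellow', 'pink', 'maroon', 'teal'}
--
-- DIVISIONS = {'premier', 'elite', 'academy', 'select', 'classic', 'competitive',
--              'ecnl', 'ecnl rl', 'ecnl-rl', 'ecrl', 'rl', 'dpl', 'dplo', 'npl', 'ga',
--              'mls next', 'mls-next', 'pre-ecnl', 'pre-academy', 'development',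
--              'showcase', 'challenge', 'recreational', 'pre ecnl'}
--
-- DIVISION_ALIASES = {
--     'ecnl-rl': 'ECNL RL',
--     'ecnl rl': 'ECNL RL',
--     'ecrl': 'ECNL RL',  # Common abbreviation
--     'rl': 'ECNL RL',  # Standalone RL = ECNL Regional League
--     'mls-next': 'MLS NEXT',
--     'mls next': 'MLS NEXT',
--     'pre-ecnl': 'Pre-ECNL',
--     'pre ecnl': 'Pre-ECNL',
-- }
--
-- ROMAN_NUMERALS = {'i', 'ii', 'iii', 'iv', 'v', 'vi', 'vii', 'viii', 'ix', 'x'}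
--
-- REGIONS = {'north', 'south', 'east', 'west', 'central', 'sw', 'ne', 'nw', 'se'}
--
-- def extract_squad_identifier(tokens: list) -> str:
--     """Extract squad identifiers from remaining tokens."""
--     squad_parts = []
--
--     # First pass: join tokens that form multi-word divisions (e.g., "ECNL" + "RL" -> "ECNL RL")
--     i = 0
--     merged_tokens = []
--     while i < len(tokens):
--         token = tokens[i]
--         t_lower = token.lower().strip()
--
--         # Check for ECNL + RL pattern
--         if t_lower == 'ecnl' and i + 1 < len(tokens) and tokens[i + 1].lower() == 'rl':
--             merged_tokens.append('ECNL RL')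
--             i += 2
--             continue
--         # Check for MLS + NEXT pattern
--         elif t_lower == 'mls' and i + 1 < len(tokens) and tokens[i + 1].lower() == 'next':
--             merged_tokens.append('MLS NEXT')
--             i += 2
--             continue
--         # Check for Pre + ECNL pattern
--         elif t_lower == 'pre' and i + 1 < len(tokens) and tokens[i + 1].lower() == 'ecnl':
--             merged_tokens.append('Pre-ECNL')
--             i += 2
--             continue
--         else:
--             merged_tokens.append(token)
--             i += 1
--
--     for token in merged_tokens:
--         t_lower = token.lower().strip()
--
--         # Check for division aliases first (normalize variations)
--         if t_lower in DIVISION_ALIASES: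
--             squad_parts.append(DIVISION_ALIASES[t_lower])
--         # Check if it's a known squad identifier
--         elif t_lower in COLORS:
--             squad_parts.append(token.title())
--         elif t_lower in DIVISIONS:
--             squad_parts.append(token.upper() if len(token) <= 4 else token.title())
--         elif t_lower in ROMAN_NUMERALS:
--             squad_parts.append(token.upper())
--         elif t_lower in REGIONS:
--             squad_parts.append(token.upper() if len(token) <= 2 else token.title())
--         else:
--             # Could be coach name or other identifier
--             squad_parts.append(token)
--
--     return ' '.join(squad_parts).strip()
-- ===== SOURCE B (Python) =====
-- COLORS = {'black', 'blue', 'red', 'white', 'navy', 'gold', 'orange', 'green',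
--           'silver', 'gray', 'grey', 'purple', 'yellow', 'pink', 'maroon', 'teal'}
--
-- DIVISIONS = {'premier', 'elite', 'academy', 'select', 'classic', 'competitive',
--              'ecnl', 'ecnl rl', 'ecnl-rl', 'ecrl', 'rl', 'dpl', 'dplo', 'npl', 'ga',
--              'mls next', 'mls-next', 'pre-ecnl', 'pre-academy', 'development',
--              'showcase', 'challenge', 'recreational', 'pre ecnl'}
--
-- DIVISION_ALIASES = {
--     'ecnl-rl': 'ECNL RL',
--     'ecnl rl': 'ECNL RL',
--     'ecrl': 'ECNL RL',
--     'rl': 'ECNL RL',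
--     'mls-next': 'MLS NEXT',
--     'mls next': 'MLS NEXT',
--     'pre-ecnl': 'Pre-ECNL',
--     'pre ecnl': 'Pre-ECNL',
-- }
--
-- ROMAN_NUMERALS = {'i', 'ii', 'iii', 'iv', 'v', 'vi', 'vii', 'viii', 'ix', 'x'}
--
-- REGIONS = {'north', 'south', 'east', 'west', 'central', 'sw', 'ne', 'nw', 'se'}
--
--
-- def _classify(token, t_lower):
--     """Classify one token (t_lower = token.lower().strip())."""
--     if t_lower in DIVISION_ALIASES:
--         return DIVISION_ALIASES[t_lower]
--     if t_lower in COLORS: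
--         return token.title()
--     if t_lower in DIVISIONS:
--         return token.upper() if len(token) <= 4 else token.title()
--     if t_lower in ROMAN_NUMERALS:
--         return token.upper()
--     if t_lower in REGIONS:
--         return token.upper() if len(token) <= 2 else token.title()
--     return token
--
--
-- def extract_squad_identifier(tokens: list) -> str:
--     """Single fused pass: merge multi-word divisions and classify in one loop."""
--     out = []
--     i = 0
--     n = len(tokens)
--     while i < n:
--         token = tokens[i]
--         t_lower = token.lower().strip()
--         if i + 1 < n:
--             nxt = tokens[i + 1].lower()
--             if t_lower == 'ecnl' and nxt == 'rl':
--                 out.append('ECNL RL')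
--                 i += 2
--                 continue
--             if t_lower == 'mls' and nxt == 'next':
--                 out.append('MLS NEXT')
--                 i += 2
--                 continue
--             if t_lower == 'pre' and nxt == 'ecnl':
--                 out.append('Pre-ECNL')
--                 i += 2
--                 continue
--         out.append(_classify(token, t_lower))
--         i += 1
--     return ' '.join(out).strip()
-- ===== Notes on version B (the rewrite author's own statement) =====
-- stated objective: simpler
-- what changed: Fuses A's two passes (merge multi-word divisions into an intermediate list, then classify each merged token) into one index-driven loop that appends the final alias string directly on a merge and classifies otherwise, with the classification cascade factored into a helper; no intermediate merged_tokens list.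
import Mathlib
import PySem

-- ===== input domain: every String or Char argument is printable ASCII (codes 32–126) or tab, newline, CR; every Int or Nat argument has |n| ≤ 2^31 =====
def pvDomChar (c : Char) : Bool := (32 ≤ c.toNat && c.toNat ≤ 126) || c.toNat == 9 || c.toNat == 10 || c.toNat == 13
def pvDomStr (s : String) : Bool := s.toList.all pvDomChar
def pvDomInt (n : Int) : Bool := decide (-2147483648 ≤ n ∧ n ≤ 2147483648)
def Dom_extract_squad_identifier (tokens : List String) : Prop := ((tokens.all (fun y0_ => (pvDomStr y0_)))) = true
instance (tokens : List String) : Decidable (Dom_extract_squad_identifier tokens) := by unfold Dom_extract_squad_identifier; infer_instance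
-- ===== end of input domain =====

-- B fuses A's two passes (merge multi-word divisions, then classify) into one loop; the proofs show the fused loop equals map-classify of the merged list.

-- shared module-level constants (ported from the Python module)
def pvCOLORS : PySem.Set String := PySem.Set.ofList
  ["black", "blue", "red", "white", "navy", "gold", "orange", "green",
   "silver", "gray", "grey", "purple", "yellow", "pink", "maroon", "teal"]

def pvDIVISIONS : PySem.Set String := PySem.Set.ofList
  ["premier", "elite", "academy", "select", "classic", "competitive",
   "ecnl", "ecnl rl", "ecnl-rl", "ecrl", "rl", "dpl", "dplo", "npl", "ga",
   "mls next", "mls-next", "pre-ecnl", "pre-academy", "development",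
   "showcase", "challenge", "recreational", "pre ecnl"]

def pvDIVISION_ALIASES : PySem.Dict String String := PySem.Dict.ofList
  [("ecnl-rl", "ECNL RL"), ("ecnl rl", "ECNL RL"), ("ecrl", "ECNL RL"),
   ("rl", "ECNL RL"), ("mls-next", "MLS NEXT"), ("mls next", "MLS NEXT"),
   ("pre-ecnl", "Pre-ECNL"), ("pre ecnl", "Pre-ECNL")]

def pvROMAN_NUMERALS : PySem.Set String := PySem.Set.ofList
  ["i", "ii", "iii", "iv", "v", "vi", "vii", "viii", "ix", "x"]

def pvREGIONS : PySem.Set String := PySem.Set.ofList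
  ["north", "south", "east", "west", "central", "sw", "ne", "nw", "se"]

-- str.title() hand-ported (no PySem primitive): exact on ASCII, where Python's
-- "cased" characters are exactly the alphabetic ones.
def pvTitleChars (prevAlpha : Bool) : List Char → List Char
  | [] => []
  | c :: cs =>
    if PySem.Chars.isalpha c then
      (if prevAlpha then PySem.Chars.lowerChar c else PySem.Chars.upperChar c) :: pvTitleChars true cs
    else c :: pvTitleChars false cs

def pvTitle (s : String) : String := String.ofList (pvTitleChars false s.toList)

-- ===== PORT A =====
-- first pass of A: the while loop building merged_tokens
def pvMergeA : List String → List String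
  | [] => []
  | [t] => [t]
  | t :: n :: rest =>
    if PySem.Str.strip (PySem.Str.lower t) = "ecnl" ∧ PySem.Str.lower n = "rl" then "ECNL RL" :: pvMergeA rest
    else if PySem.Str.strip (PySem.Str.lower t) = "mls" ∧ PySem.Str.lower n = "next" then "MLS NEXT" :: pvMergeA rest
    else if PySem.Str.strip (PySem.Str.lower t) = "pre" ∧ PySem.Str.lower n = "ecnl" then "Pre-ECNL" :: pvMergeA rest
    else t :: pvMergeA (n :: rest)

-- second pass of A: the per-token body of the for loop over merged_tokens
def pvClassifyA (token : String) : String :=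
  let tl := PySem.Str.strip (PySem.Str.lower token)
  if pvDIVISION_ALIASES.contains tl then pvDIVISION_ALIASES.getD tl ""
  else if tl ∈ pvCOLORS then pvTitle token
  else if tl ∈ pvDIVISIONS then (if PySem.Str.len token ≤ 4 then PySem.Str.upper token else pvTitle token)
  else if tl ∈ pvROMAN_NUMERALS then PySem.Str.upper token
  else if tl ∈ pvREGIONS then (if PySem.Str.len token ≤ 2 then PySem.Str.upper token else pvTitle token)
  else token

def extract_squad_identifier (tokens : List String) : String :=
  PySem.Str.strip (PySem.Str.join " " ((pvMergeA tokens).map pvClassifyA))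

-- ===== PORT B =====
-- port of Source B's _classify(token, t_lower)
def pvClassifyB (token : String) (tl : String) : String :=
  if pvDIVISION_ALIASES.contains tl then pvDIVISION_ALIASES.getD tl ""
  else if tl ∈ pvCOLORS then pvTitle token
  else if tl ∈ pvDIVISIONS then (if PySem.Str.len token ≤ 4 then PySem.Str.upper token else pvTitle token)
  else if tl ∈ pvROMAN_NUMERALS then PySem.Str.upper token
  else if tl ∈ pvREGIONS then (if PySem.Str.len token ≤ 2 then PySem.Str.upper token else pvTitle token)
  else token

-- Source B's single fused while loop
def pvFusedB : List String → List String
  | [] => []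
  | [t] => [pvClassifyB t (PySem.Str.strip (PySem.Str.lower t))]
  | t :: n :: rest =>
    if PySem.Str.strip (PySem.Str.lower t) = "ecnl" ∧ PySem.Str.lower n = "rl" then "ECNL RL" :: pvFusedB rest
    else if PySem.Str.strip (PySem.Str.lower t) = "mls" ∧ PySem.Str.lower n = "next" then "MLS NEXT" :: pvFusedB rest
    else if PySem.Str.strip (PySem.Str.lower t) = "pre" ∧ PySem.Str.lower n = "ecnl" then "Pre-ECNL" :: pvFusedB rest
    else pvClassifyB t (PySem.Str.strip (PySem.Str.lower t)) :: pvFusedB (n :: rest)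

def extract_squad_identifier_alt (tokens : List String) : String :=
  PySem.Str.strip (PySem.Str.join " " (pvFusedB tokens))

-- ===== PRECONDITION & SPEC =====
def Spec_extract_squad_identifier (tokens : List String) (out : String) : Prop := out = extract_squad_identifier_alt tokens
instance (tokens : List String) (out : String) : Decidable (Spec_extract_squad_identifier tokens out) := by unfold Spec_extract_squad_identifier; infer_instance

-- ===== CLAIM (what is proved, stated in full; the proofs are below) =====
def Claim_equal_extract_squad_identifier : Prop := ∀ (tokens : List String), Dom_extract_squad_identifier tokens → Spec_extract_squad_identifier tokens (extract_squad_identifier tokens)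

-- ===== LEMMAS AND PROOFS =====

theorem pvClassifyA_eq (t : String) : pvClassifyA t = pvClassifyB t (PySem.Str.strip (PySem.Str.lower t)) := rfl

theorem pvClassifyA_ECNL_RL : pvClassifyA "ECNL RL" = "ECNL RL" := by decide
theorem pvClassifyA_MLS_NEXT : pvClassifyA "MLS NEXT" = "MLS NEXT" := by decide
theorem pvClassifyA_Pre_ECNL : pvClassifyA "Pre-ECNL" = "Pre-ECNL" := by decide

theorem pvFusedB_eq_map (ts : List String) :
    pvFusedB ts = (pvMergeA ts).map pvClassifyA := by
  induction ts using pvFusedB.induct with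
  | case1 => simp [pvFusedB, pvMergeA]
  | case2 t => simp [pvFusedB, pvMergeA, pvClassifyA_eq]
  | case3 t n rest h ih =>
    simp only [pvFusedB, pvMergeA, if_pos h, List.map, ih, pvClassifyA_ECNL_RL]
  | case4 t n rest h1 h2 ih =>
    simp only [pvFusedB, pvMergeA, if_neg h1, if_pos h2, List.map, ih, pvClassifyA_MLS_NEXT]
  | case5 t n rest h1 h2 h3 ih =>
    simp only [pvFusedB, pvMergeA, if_neg h1, if_neg h2, if_pos h3, List.map, ih, pvClassifyA_Pre_ECNL]
  | case6 t n rest h1 h2 h3 ih =>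
    simp only [pvFusedB, pvMergeA, if_neg h1, if_neg h2, if_neg h3, List.map, ih, pvClassifyA_eq]

-- ===== VERDICT (by name: the statement is the Claim_ definition above) =====
theorem extract_squad_identifier_spec : Claim_equal_extract_squad_identifier := by
  intro tokens _
  unfold Spec_extract_squad_identifier extract_squad_identifier extract_squad_identifier_alt
  rw [pvFusedB_eq_map]
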